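-- pv_equiv track=rewrite | github.com/avishek376/Scaler-Problem-Solving | Advanced/27 Advanced DSA : Queues /Assignment/Q3. N integers containing only 1, 2 & 3/N integers containing only 1, 2 & 3.py | solve
-- ===== SOURCE A (Python) =====
-- from collections import deque
--
-- def solve(A):
--     q = deque()
--     lst = []
--     q.append("1")
--     q.append("2")
--     q.append("3")
--
--     for i in range(A):
--         element = q.popleft()  # Pops out the front of the queue
--         lst.append(element)
--
--         q.append(element + "1")
--         q.append(element + "2")
--         q.append(element + "3")
--
--     return lst
-- ===== SOURCE B (Python) =====
-- def solve(A):
--     res = []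
--     for i in range(1, A + 1):
--         n = i
--         s = ""
--         while n:
--             n -= 1
--             s = "123"[n % 3] + s
--             n //= 3
--         res.append(s)
--     return res
-- ===== Notes on version B (the rewrite author's own statement) =====
-- stated objective: alternative
-- what changed: Replaced the BFS queue (deque that pops each string and pushes its three children) by a direct per-index computation: each output string is its index written in bijective base three, computed independently for every index.
import Mathlib
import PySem

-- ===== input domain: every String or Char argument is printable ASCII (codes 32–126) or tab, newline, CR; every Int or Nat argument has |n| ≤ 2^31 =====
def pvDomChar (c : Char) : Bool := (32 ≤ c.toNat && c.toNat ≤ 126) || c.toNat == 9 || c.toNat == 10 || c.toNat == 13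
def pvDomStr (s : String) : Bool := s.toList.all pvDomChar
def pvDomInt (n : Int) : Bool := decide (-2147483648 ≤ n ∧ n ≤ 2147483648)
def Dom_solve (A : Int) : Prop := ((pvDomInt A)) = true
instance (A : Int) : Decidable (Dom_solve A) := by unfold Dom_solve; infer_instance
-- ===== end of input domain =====

-- B replaces A's BFS queue by computing each output string independently as its
-- index written in bijective base 3 (alternative decomposition, same cost).

-- ===== PORT A =====
-- one iteration of A's for-loop: popleft, record it, push its three children
-- (the queue always holds ≥ 3 elements, so the [] branch is unreachable)
def solveStep (st : List String × List String) (_i : Int) : List String × List String :=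
  match st with
  | (q, lst) =>
    match q with
    | [] => ([], lst)
    | e :: rest => (rest ++ [e ++ "1", e ++ "2", e ++ "3"], lst ++ [e])

def solve (A : Int) : List String :=
  ((PySem.List.pyRange 0 A 1).foldl solveStep (["1", "2", "3"], [])).2

-- ===== PORT B =====
-- "123"[r] for r = (n-1) % 3
def bijDigit (r : Nat) : Char := if r = 0 then '1' else if r = 1 then '2' else '3'

-- the while loop of B: n ↦ n-1, prepend "123"[n%3], n ↦ n//3
def bijLoop : Nat → String → String
  | 0, s => s
  | (m + 1), s => bijLoop (m / 3) (String.singleton (bijDigit (m % 3)) ++ s)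
decreasing_by exact Nat.lt_succ_of_le (Nat.div_le_self m 3)

def solve_alt (A : Int) : List String :=
  (PySem.List.pyRange 1 (A + 1) 1).map (fun i => bijLoop i.toNat "")

-- ===== PRECONDITION & SPEC =====
def Spec_solve (A : Int) (out : List String) : Prop := out = solve_alt A
instance (A : Int) (out : List String) : Decidable (Spec_solve A out) := by unfold Spec_solve; infer_instance

-- ===== CLAIM (what is proved, stated in full; the proofs are below) =====
def Claim_equal_solve : Prop := ∀ (A : Int), Dom_solve A → Spec_solve A (solve A)

-- ===== LEMMAS AND PROOFS =====

-- the accumulator of bijLoop is just appended to the result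
theorem bijLoop_eq (n : Nat) : ∀ s, bijLoop n s = bijLoop n "" ++ s := by
  induction n using Nat.strong_induction_on with
  | _ n ih =>
    intro s
    match n with
    | 0 => simp [bijLoop]
    | m + 1 =>
      have h : m / 3 < m + 1 := Nat.lt_succ_of_le (Nat.div_le_self m 3)
      rw [bijLoop, bijLoop, ih (m / 3) h (String.singleton (bijDigit (m % 3)) ++ s),
        ih (m / 3) h (String.singleton (bijDigit (m % 3)) ++ ""),
        String.append_empty, String.append_assoc]

-- f n = n written in bijective base 3 (proof-side abbreviation of B's per-index string)
def f (n : Nat) : String := bijLoop n ""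

-- the child of n along digit d+1 is 3n + d + 1
theorem f_child (n d : Nat) (hd : d < 3) :
    f (3 * n + d + 1) = f n ++ String.singleton (bijDigit d) := by
  have h1 : (3 * n + d) / 3 = n := by omega
  have h2 : (3 * n + d) % 3 = d := by omega
  show bijLoop (3 * n + d + 1) "" = _
  rw [bijLoop, h1, h2, bijLoop_eq]
  simp [f]

-- queue invariant: if the queue holds f m, f (m+1), …, f (3m) then folding any k
-- further steps emits f m, …, f (m+k-1) and keeps the queue in the same shape
theorem inv (l : List Int) : ∀ (m : Nat) (acc : List String),
    (l.foldl solveStep ((List.range' m (2 * m + 1)).map f, acc)).2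
      = acc ++ (List.range' m l.length).map f := by
  induction l with
  | nil => intro m acc; simp
  | cons a l ih =>
    intro m acc
    have hq : (List.range' m (2 * m + 1)).map f
        = f m :: (List.range' (m + 1) (2 * m)).map f := by
      simp [List.range']
    have hq' : (List.range' (m + 1) (2 * m)).map f
          ++ [f m ++ "1", f m ++ "2", f m ++ "3"]
        = (List.range' (m + 1) (2 * (m + 1) + 1)).map f := by
      have e1 : f m ++ "1" = f (3 * m + 0 + 1) := by
        rw [f_child m 0 (by omega)]; rfl
      have e2 : f m ++ "2" = f (3 * m + 1 + 1) := by
        rw [f_child m 1 (by omega)]; rfl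
      have e3 : f m ++ "3" = f (3 * m + 2 + 1) := by
        rw [f_child m 2 (by omega)]; rfl
      have : 2 * (m + 1) + 1 = (2 * m + 1) + 1 + 1 := by omega
      rw [this, List.range'_concat, List.range'_concat, List.range'_concat]
      simp [e1, e2, e3]
      constructor
      · congr 1; omega
      constructor
      · congr 1; omega
      · congr 1; omega
    rw [List.foldl_cons, hq]
    show ((l.foldl solveStep
        ((List.range' (m+1) (2*m)).map f ++ [f m ++ "1", f m ++ "2", f m ++ "3"],
          acc ++ [f m]))).2 = _
    rw [hq', ih (m + 1) (acc ++ [f m])]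
    simp [List.range']

-- ===== VERDICT (by name: the statement is the Claim_ definition above) =====
theorem solve_spec : Claim_equal_solve := by
  intro A _
  show solve A = solve_alt A
  unfold solve solve_alt
  rw [PySem.List.pyRange_one, PySem.List.pyRange_one]
  have hinit : (["1", "2", "3"] : List String) = (List.range' 1 (2 * 1 + 1)).map f := by
    simp [List.range', f, bijLoop, bijDigit]
    exact ⟨rfl, rfl, rfl⟩
  rw [hinit, inv _ 1 []]
  simp only [List.length_map, List.length_range]
  have hA : (A + 1 - 1).toNat = (A - 0).toNat := by omega
  rw [hA, List.range'_eq_map_range]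
  simp [List.map_map, Function.comp]
  intro k _
  show f (1 + k) = bijLoop ((1 : Int) + (k : Int)).toNat ""
  have : ((1 : Int) + (k : Int)).toNat = 1 + k := by omega
  rw [this]; rfl
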